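-- pv_equiv track=rewrite | github.com/hqbao/flight-controller | pytest/gps_sim_ubx.py | calculate_ubx_checksum
-- ===== SOURCE A (Python) =====
-- def calculate_ubx_checksum(msg_class, msg_id, payload):
--     """Calculate UBX checksum (Fletcher-like algorithm)"""
--     ck_a = 0
--     ck_b = 0
--
--     # Checksum over class, id, length, and payload
--     ck_a = (ck_a + msg_class) & 0xFF
--     ck_b = (ck_b + ck_a) & 0xFF
--
--     ck_a = (ck_a + msg_id) & 0xFF
--     ck_b = (ck_b + ck_a) & 0xFF
--
--     length = len(payload)
--     ck_a = (ck_a + (length & 0xFF)) & 0xFF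
--     ck_b = (ck_b + ck_a) & 0xFF
--
--     ck_a = (ck_a + ((length >> 8) & 0xFF)) & 0xFF
--     ck_b = (ck_b + ck_a) & 0xFF
--
--     for byte in payload:
--         ck_a = (ck_a + byte) & 0xFF
--         ck_b = (ck_b + ck_a) & 0xFF
--
--     return ck_a, ck_b
-- ===== SOURCE B (Python) =====
-- def calculate_ubx_checksum(msg_class, msg_id, payload):
--     """Closed form: ck_a = (sum of all checksummed bytes) & 0xFF;
--     ck_b = (position-weighted sum, weight n-i) & 0xFF."""
--     length = len(payload)
--     seq = [msg_class, msg_id, length & 0xFF, (length >> 8) & 0xFF] + payload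
--     n = len(seq)
--     ck_a = sum(seq) & 0xFF
--     ck_b = sum((n - i) * b for i, b in enumerate(seq)) & 0xFF
--     return ck_a, ck_b
-- ===== Notes on version B (the rewrite author's own statement) =====
-- stated objective: alternative
-- what changed: Replaces the sequential Fletcher accumulator updates by a closed form: ck_a is the plain sum of the checksummed bytes and ck_b is the position-weighted sum (weight n-i), each masked with 0xFF only once at the end.
import Mathlib
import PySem

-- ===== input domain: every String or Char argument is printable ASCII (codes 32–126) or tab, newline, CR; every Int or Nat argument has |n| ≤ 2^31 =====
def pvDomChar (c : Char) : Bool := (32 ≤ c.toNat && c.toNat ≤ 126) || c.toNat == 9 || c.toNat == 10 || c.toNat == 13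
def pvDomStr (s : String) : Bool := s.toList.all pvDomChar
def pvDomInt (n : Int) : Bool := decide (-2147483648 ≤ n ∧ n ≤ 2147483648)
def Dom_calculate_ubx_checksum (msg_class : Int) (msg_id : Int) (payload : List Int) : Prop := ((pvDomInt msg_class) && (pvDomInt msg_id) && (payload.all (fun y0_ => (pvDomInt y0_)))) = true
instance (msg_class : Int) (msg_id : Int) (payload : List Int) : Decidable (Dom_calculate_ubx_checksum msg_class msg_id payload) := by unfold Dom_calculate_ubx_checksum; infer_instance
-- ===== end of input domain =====

-- B replaces A's sequential Fletcher accumulation by the closed form: ck_a = (sum of bytes) & 0xFF, ck_b = (sum of (n-i)*byte_i) & 0xFF (objective: alternative).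


-- ===== PORT A =====
-- Literal port of A: four unrolled header updates, then a fold over the payload.
def calculate_ubx_checksum (msg_class : Int) (msg_id : Int) (payload : List Int) : Int × Int :=
  let ck_a : Int := 0
  let ck_b : Int := 0
  let ck_a := PySem.Int.band (ck_a + msg_class) 255
  let ck_b := PySem.Int.band (ck_b + ck_a) 255
  let ck_a := PySem.Int.band (ck_a + msg_id) 255
  let ck_b := PySem.Int.band (ck_b + ck_a) 255
  let length : Int := (payload.length : Int)
  let ck_a := PySem.Int.band (ck_a + PySem.Int.band length 255) 255
  let ck_b := PySem.Int.band (ck_b + ck_a) 255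
  let ck_a := PySem.Int.band (ck_a + PySem.Int.band (length >>> 8) 255) 255
  let ck_b := PySem.Int.band (ck_b + ck_a) 255
  payload.foldl (fun (s : Int × Int) byte =>
    let ck_a := PySem.Int.band (s.1 + byte) 255
    let ck_b := PySem.Int.band (s.2 + ck_a) 255
    (ck_a, ck_b)) (ck_a, ck_b)

-- ===== PORT B =====
-- Port of B: closed form — plain sum and position-weighted sum over the combined sequence, masked once at the end.
def calculate_ubx_checksum_alt (msg_class : Int) (msg_id : Int) (payload : List Int) : Int × Int :=
  let length : Int := (payload.length : Int)
  let seq : List Int := [msg_class, msg_id, PySem.Int.band length 255, PySem.Int.band (length >>> 8) 255] ++ payload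
  let n : Int := (seq.length : Int)
  let ck_a := PySem.Int.band seq.sum 255
  let ck_b := PySem.Int.band (((PySem.List.enumerate seq).map (fun ib => (n - ib.1) * ib.2)).sum) 255
  (ck_a, ck_b)

-- ===== PRECONDITION & SPEC =====
def Spec_calculate_ubx_checksum (msg_class : Int) (msg_id : Int) (payload : List Int) (out : Int × Int) : Prop := out = calculate_ubx_checksum_alt msg_class msg_id payload
instance (msg_class : Int) (msg_id : Int) (payload : List Int) (out : Int × Int) : Decidable (Spec_calculate_ubx_checksum msg_class msg_id payload out) := by unfold Spec_calculate_ubx_checksum; infer_instance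

-- ===== CLAIM (what is proved, stated in full; the proofs are below) =====
def Claim_equal_calculate_ubx_checksum : Prop := ∀ (msg_class : Int) (msg_id : Int) (payload : List Int), Dom_calculate_ubx_checksum msg_class msg_id payload → Spec_calculate_ubx_checksum msg_class msg_id payload (calculate_ubx_checksum msg_class msg_id payload)

-- ===== LEMMAS AND PROOFS =====

-- masking with 0xFF is reduction mod 256 (Python floor-mod = Int.emod for positive modulus)
theorem pv_band255 (x : Int) : PySem.Int.band x 255 = x % 256 := by
  unfold PySem.Int.band
  by_cases h : 0 ≤ x
  · rw [if_pos h, if_pos (by norm_num : (0:Int) ≤ 255)]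
    have hm := Nat.and_two_pow_sub_one_eq_mod x.toNat 8
    norm_num at hm
    rw [show ((255:Int).toNat = 255) from rfl, hm]
    omega
  · rw [if_neg h, if_pos (by norm_num : (0:Int) ≤ 255)]
    rw [show ((255:Int).toNat = 255) from rfl, Nat.and_comm,
      (by norm_num : (255:Nat) = 2 ^ 8 - 1), Nat.and_two_pow_sub_one_eq_mod]
    norm_num
    omega

-- the Fletcher step of both Pythons, as a named function
def pvStep (s : Int × Int) (b : Int) : Int × Int :=
  let ck_a := PySem.Int.band (s.1 + b) 255
  let ck_b := PySem.Int.band (s.2 + ck_a) 255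
  (ck_a, ck_b)

-- position-weighted sum with leading weight k
def pvV : List Int → Int → Int
  | [], _ => 0
  | x :: xs, k => k * x + pvV xs (k - 1)

theorem pvV_enumerate (l : List Int) : ∀ (s k : Int),
    ((PySem.List.enumerate l s).map (fun ib => (k - ib.1) * ib.2)).sum = pvV l (k - s) := by
  induction l with
  | nil => intro s k; simp [PySem.List.enumerate_nil, pvV]
  | cons x xs ih =>
    intro s k
    rw [PySem.List.enumerate_cons]
    simp only [List.map_cons, List.sum_cons, ih (s + 1) k, pvV]
    ring_nf

theorem pv_fold_closed (l : List Int) : ∀ (a b : Int), a % 256 = a → b % 256 = b →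
    l.foldl pvStep (a, b) =
      ((a + l.sum) % 256, (b + (l.length : Int) * a + pvV l (l.length : Int)) % 256) := by
  induction l with
  | nil => intro a b ha hb; simp [pvV, ha, hb]
  | cons x xs ih =>
    intro a b ha hb
    have hstep : pvStep (a, b) x = ((a + x) % 256, (b + (a + x) % 256) % 256) := by
      simp [pvStep, pv_band255]
    rw [List.foldl_cons, hstep,
      ih _ _ (Int.emod_emod_of_dvd _ dvd_rfl) (Int.emod_emod_of_dvd _ dvd_rfl)]
    set m : Int := (xs.length : Int) with hm
    have h1 : ((a + x) % 256 + xs.sum) % 256 = (a + x + xs.sum) % 256 := by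
      conv_rhs => rw [Int.add_emod]
      rw [Int.add_emod ((a + x) % 256)]
      omega
    have hA : (a + x) % 256 ≡ a + x [ZMOD 256] := Int.emod_emod_of_dvd _ dvd_rfl
    have hB : (b + (a + x) % 256) % 256 ≡ b + (a + x) [ZMOD 256] :=
      (Int.emod_emod_of_dvd _ dvd_rfl).trans ((Int.ModEq.refl b).add hA)
    have h2 : ((b + (a + x) % 256) % 256 + m * ((a + x) % 256) + pvV xs m) % 256
        = (b + ((m + 1 : Int)) * a + pvV (x :: xs) (m + 1)) % 256 := by
      have := (hB.add (hA.mul_left m)).add (Int.ModEq.refl (pvV xs m))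
      have h3 : b + (a + x) + m * (a + x) + pvV xs m
          = b + (m + 1) * a + pvV (x :: xs) (m + 1) := by
        simp [pvV]; ring
      calc ((b + (a + x) % 256) % 256 + m * ((a + x) % 256) + pvV xs m) % 256
          = (b + (a + x) + m * (a + x) + pvV xs m) % 256 := this
        _ = (b + (m + 1) * a + pvV (x :: xs) (m + 1)) % 256 := by rw [h3]
    simp only [List.sum_cons, List.length_cons]
    rw [h1, h2]
    push_cast
    ring_nf
    rw [hm]

-- ===== VERDICT (by name: the statement is the Claim_ definition above) =====
theorem calculate_ubx_checksum_spec : Claim_equal_calculate_ubx_checksum := by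
  intro msg_class msg_id payload _
  unfold Spec_calculate_ubx_checksum
  have hfold : ∀ (l : List Int), l.foldl pvStep ((0 : Int), (0 : Int))
      = ((l.sum) % 256, pvV l (l.length : Int) % 256) := by
    intro l
    have := pv_fold_closed l 0 0 (by decide) (by decide)
    simpa using this
  have hA : calculate_ubx_checksum msg_class msg_id payload
      = ([msg_class, msg_id, PySem.Int.band (payload.length : Int) 255,
          PySem.Int.band ((payload.length : Int) >>> 8) 255] ++ payload).foldl pvStep (0, 0) := by
    rfl
  have hB : calculate_ubx_checksum_alt msg_class msg_id payload
      = (PySem.Int.band ([msg_class, msg_id, PySem.Int.band (payload.length : Int) 255,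
            PySem.Int.band ((payload.length : Int) >>> 8) 255] ++ payload).sum 255,
         PySem.Int.band (((PySem.List.enumerate ([msg_class, msg_id,
            PySem.Int.band (payload.length : Int) 255,
            PySem.Int.band ((payload.length : Int) >>> 8) 255] ++ payload)).map
            (fun ib => ((([msg_class, msg_id, PySem.Int.band (payload.length : Int) 255,
              PySem.Int.band ((payload.length : Int) >>> 8) 255] ++ payload).length : Int) - ib.1) * ib.2)).sum) 255) := rfl
  rw [hA, hfold, hB]
  simp only [pv_band255, pvV_enumerate, sub_zero]
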